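-- pv_equiv track=rewrite | github.com/FabianAspee/gRPC_Plt_Wind_Turbine | ScriptStatisticWindTurbine/UtilsPLT.py | split_series_by_error
-- ===== SOURCE A (Python) =====
-- from typing import List
--
-- errors: List[int] = [180, 3370, 186, 182, 181]
--
-- def split_series_by_error(all_value_period: list):
--     sub_series = []
--     final_sub_series = []
--     for val in all_value_period:
--         if val not in errors:
--             sub_series.append(val)
--         if val in errors:
--             sub_series.append(val)
--             final_sub_series.append(sub_series)
--             sub_series = []
--     return final_sub_series
-- ===== SOURCE B (Python) =====
-- ERR = (180, 3370, 186, 182, 181)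
--
-- def split_series_by_error(all_value_period: list):
--     # single right-to-left pass: build chunks back-to-front; values after the
--     # last marker never enter a chunk, so they are dropped naturally
--     out = []
--     cur = []
--     started = False
--     for v in reversed(all_value_period):
--         if v in ERR:
--             if started:
--                 out.append(cur[::-1])
--             cur = [v]
--             started = True
--         elif started:
--             cur.append(v)
--     if started:
--         out.append(cur[::-1])
--     out.reverse()
--     return out
-- ===== Notes on version B (the rewrite author's own statement) =====
-- stated objective: alternative
-- what changed: Replaces A's forward accumulate-and-flush loop (two membership tests per element, buffer reset at each marker) by a single right-to-left pass that builds the chunks back-to-front, so trailing post-marker values are dropped naturally without flush bookkeeping.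
import Mathlib
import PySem

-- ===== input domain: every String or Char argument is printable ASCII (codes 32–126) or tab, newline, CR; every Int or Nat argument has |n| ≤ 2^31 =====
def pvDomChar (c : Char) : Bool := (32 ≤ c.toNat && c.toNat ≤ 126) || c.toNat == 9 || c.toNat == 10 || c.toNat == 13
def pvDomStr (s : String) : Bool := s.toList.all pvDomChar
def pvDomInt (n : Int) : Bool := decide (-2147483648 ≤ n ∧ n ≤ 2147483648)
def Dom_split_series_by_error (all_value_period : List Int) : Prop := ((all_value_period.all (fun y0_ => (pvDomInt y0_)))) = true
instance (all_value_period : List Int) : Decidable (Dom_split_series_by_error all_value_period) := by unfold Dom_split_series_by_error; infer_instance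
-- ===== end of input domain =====

-- B: one right-to-left pass building chunks back-to-front instead of A's forward accumulate-and-flush loop (alternative decomposition, same cost).

-- ===== PORT A =====
def pvErrors : List Int := [180, 3370, 186, 182, 181]

-- loop body of A: two successive ifs, exactly as in the Python
def pvStepA (st : List Int × List (List Int)) (val : Int) : List Int × List (List Int) :=
  let st := if val ∉ pvErrors then (st.1 ++ [val], st.2) else st
  if val ∈ pvErrors then ([], st.2 ++ [st.1 ++ [val]]) else st

def split_series_by_error (all_value_period : List Int) : List (List Int) :=
  (all_value_period.foldl pvStepA ([], [])).2

-- ===== PORT B =====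
-- loop body of B (processing the reversed list): state = (out, cur, started)
def pvStepB (st : List (List Int) × List Int × Bool) (v : Int) :
    List (List Int) × List Int × Bool :=
  let (out, cur, started) := st
  if v ∈ pvErrors then
    ((if started then out ++ [cur.reverse] else out), [v], true)
  else if started then (out, cur ++ [v], started)
  else st

def split_series_by_error_alt (all_value_period : List Int) : List (List Int) :=
  let st := all_value_period.reverse.foldl pvStepB ([], [], false)
  if st.2.2 then (st.1 ++ [st.2.1.reverse]).reverse else []

-- ===== PRECONDITION & SPEC =====
def Spec_split_series_by_error (all_value_period : List Int) (out : List (List Int)) : Prop := out = split_series_by_error_alt all_value_period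
instance (all_value_period : List Int) (out : List (List Int)) : Decidable (Spec_split_series_by_error all_value_period out) := by unfold Spec_split_series_by_error; infer_instance

-- ===== CLAIM (what is proved, stated in full; the proofs are below) =====
def Claim_equal_split_series_by_error : Prop := ∀ (all_value_period : List Int), Dom_split_series_by_error all_value_period → Spec_split_series_by_error all_value_period (split_series_by_error all_value_period)

-- ===== LEMMAS AND PROOFS =====

-- ===== VERDICT (by name: the statement is the Claim_ definition above) =====
-- clean structural characterisation both ports are proved equal to
def pvConsPref (sub : List Int) : List (List Int) → List (List Int)
  | [] => []
  | c :: cs => (sub ++ c) :: cs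

def pvSpec : List Int → List (List Int)
  | [] => []
  | v :: rest => if v ∈ pvErrors then [v] :: pvSpec rest else pvConsPref [v] (pvSpec rest)

theorem pvConsPref_nil (l : List (List Int)) : pvConsPref [] l = l := by
  cases l <;> simp [pvConsPref]

theorem pvA_inv (xs : List Int) : ∀ (sub : List Int) (fin : List (List Int)),
    (xs.foldl pvStepA (sub, fin)).2 = fin ++ pvConsPref sub (pvSpec xs) := by
  induction xs with
  | nil => intro sub fin; simp [pvSpec, pvConsPref]
  | cons v rest ih =>
    intro sub fin
    by_cases h : v ∈ pvErrors
    · rw [List.foldl_cons]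
      simp only [pvStepA, if_neg (not_not_intro h), if_pos h]
      rw [ih [] (fin ++ [sub ++ [v]])]
      simp [pvSpec, h, pvConsPref]
      cases pvSpec rest <;> rfl
    · rw [List.foldl_cons]
      simp only [pvStepA, if_pos h, if_neg h]
      rw [ih (sub ++ [v]) fin]
      simp [pvSpec, h, pvConsPref]
      cases pvSpec rest <;> rfl

theorem pvB_inv (xs : List Int) :
    ((xs.foldr (fun v st => pvStepB st v) ([], [], false)).2.2 = true →
      (xs.foldr (fun v st => pvStepB st v) ([], [], false)).2.1.reverse ::
        (xs.foldr (fun v st => pvStepB st v) ([], [], false)).1.reverse = pvSpec xs) ∧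
    ((xs.foldr (fun v st => pvStepB st v) ([], [], false)).2.2 = false →
      xs.foldr (fun v st => pvStepB st v) ([], [], false) = ([], [], false) ∧ pvSpec xs = []) := by
  induction xs with
  | nil => simp [pvSpec]
  | cons v rest ih =>
    rw [List.foldr_cons]
    rcases hst : rest.foldr (fun v st => pvStepB st v) ([], [], false) with ⟨o, c, st⟩
    rw [hst] at ih
    by_cases h : v ∈ pvErrors
    · cases st with
      | true =>
        have hspec := ih.1 rfl
        simp [pvStepB, h, pvSpec, ← hspec]
      | false =>
        obtain ⟨h1, h2⟩ := ih.2 rfl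
        simp only [Prod.mk.injEq] at h1
        simp [pvStepB, h, pvSpec, h1.1, h2]
    · cases st with
      | true =>
        have hspec := ih.1 rfl
        simp [pvStepB, h, pvSpec, ← hspec, pvConsPref]
      | false =>
        obtain ⟨h1, h2⟩ := ih.2 rfl
        simp [pvStepB, h, pvSpec, h1, h2, pvConsPref]

theorem pvA_eq_spec (xs : List Int) : split_series_by_error xs = pvSpec xs := by
  unfold split_series_by_error
  rw [pvA_inv xs [] []]
  simp [pvConsPref_nil]

theorem pvB_eq_spec (xs : List Int) : split_series_by_error_alt xs = pvSpec xs := by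
  unfold split_series_by_error_alt
  rw [List.foldl_reverse]
  have h := pvB_inv xs
  rcases hst : xs.foldr (fun v st => pvStepB st v) ([], [], false) with ⟨o, c, st⟩
  rw [hst] at h
  cases st with
  | true =>
    have hspec := h.1 rfl
    simp at hspec ⊢
    simpa using hspec
  | false =>
    have h2 := (h.2 rfl).2
    simp [h2]

theorem split_series_by_error_spec : Claim_equal_split_series_by_error := by
  intro xs _
  unfold Spec_split_series_by_error
  rw [pvA_eq_spec, pvB_eq_spec]
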